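-- pv_equiv track=rewrite | github.com/hidcontrol/javael-to-feel | src/tstpyeda_02.py | find_innermost_brackets
-- ===== SOURCE A (Python) =====
-- def find_innermost_brackets(formula):
--     """Return the indices of (one of) the innermost bracketed term.
--     Args:
--             formula (list of str): The formula split at whitespace.
--
--     Returns:
--             int: The first index of the first innermost bracketed term.
--             int: The last index +1 of the first innermost bracketed term.
--
--     """
--     d = 0
--     d_max = 0
--     i_max = [0, len(formula)-1]
--     inside = False
--     for i, symb in enumerate(formula):
--         if symb == "(":
--             d += 1
--             if d > d_max:
--                 d_max = d
--                 i_max = []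
--                 inside = True
--         elif symb == ")":
--             d = max(d-1, 0)
--             inside = False
--         elif inside:
--             i_max.append(i)
--     return i_max[0], i_max[-1]+1
-- ===== SOURCE B (Python) =====
-- def find_innermost_brackets(formula):
--     """Return the indices of (one of) the innermost bracketed term.
--
--     Two-pass version: locate the first "(" reaching the maximal bracket
--     depth, then scan forward to the matching ")" (or the end).
--     """
--     if "(" not in formula:
--         return 0, len(formula)
--     d = 0
--     opens = []  # (index, depth reached) for every "("
--     for i, symb in enumerate(formula):
--         if symb == "(":
--             d += 1
--             opens.append((i, d))
--         elif symb == ")":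
--             d = max(d - 1, 0)
--     d_max = max(dep for _, dep in opens)
--     start = next(i for i, dep in opens if dep == d_max) + 1
--     end = start
--     while end < len(formula) and formula[end] != ")":
--         end += 1
--     return start, end
-- ===== Notes on version B (the rewrite author's own statement) =====
-- stated objective: alternative
-- what changed: A's single pass maintaining a running max depth, an 'inside' flag and a growing index list is replaced by a guard for bracket-free input plus two passes: collect each '(' with its depth, pick the first one reaching the maximal depth, scan forward to the closing ')' and return the bounds of that range; Pre_ excludes exactly the inputs where A raises IndexError (formulas whose first deepest '(' is immediately followed by ')' or the end of the list), where B naturally returns the empty range (start, start).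
import Mathlib
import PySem

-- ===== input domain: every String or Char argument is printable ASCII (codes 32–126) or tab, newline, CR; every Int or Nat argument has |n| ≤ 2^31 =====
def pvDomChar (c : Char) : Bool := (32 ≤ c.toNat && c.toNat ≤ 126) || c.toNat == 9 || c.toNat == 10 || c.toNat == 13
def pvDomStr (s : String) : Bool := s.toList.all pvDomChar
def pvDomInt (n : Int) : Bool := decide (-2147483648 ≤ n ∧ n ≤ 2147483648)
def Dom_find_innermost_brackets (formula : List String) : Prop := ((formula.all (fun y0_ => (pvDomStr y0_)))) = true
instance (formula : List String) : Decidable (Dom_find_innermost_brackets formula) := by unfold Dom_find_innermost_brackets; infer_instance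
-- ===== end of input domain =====

-- B replaces A's one-pass state machine (running depth, record depth, inside flag, accumulated index list)
-- by a guard for bracket-free input plus two passes: collect every "(" with its depth, pick the first one
-- reaching the maximal depth, scan forward to its closing ")" and return the bounds. Alternative decomposition, not claimed faster.

-- ===== PORT A =====
def pvAStep (st : Int × Int × List Int × Bool) (p : Int × String) : Int × Int × List Int × Bool :=
  if p.2 = "(" then
    if st.1 + 1 > st.2.1 then (st.1 + 1, st.1 + 1, [], true)
    else (st.1 + 1, st.2.1, st.2.2.1, st.2.2.2)
  else if p.2 = ")" then (max (st.1 - 1) 0, st.2.1, st.2.2.1, false)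
  else if st.2.2.2 then (st.1, st.2.1, st.2.2.1 ++ [p.1], st.2.2.2)
  else st

def find_innermost_brackets (formula : List String) : Int × Int :=
  let st := (PySem.List.enumerate formula 0).foldl pvAStep (0, 0, [0, (formula.length : Int) - 1], false)
  (st.2.2.1.headD 0, st.2.2.1.getLastD 0 + 1)   -- i_max[0], i_max[-1]+1; Pre_ excludes the empty case (IndexError)

-- ===== PORT B =====
def pvBStep (st : Int × List (Int × Int)) (p : Int × String) : Int × List (Int × Int) :=
  if p.2 = "(" then (st.1 + 1, st.2 ++ [(p.1, st.1 + 1)])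
  else if p.2 = ")" then (max (st.1 - 1) 0, st.2)
  else st

def pvScanEnd (formula : List String) (k : Nat) : Nat :=
  if h : k < formula.length then
    if formula[k] ≠ ")" then pvScanEnd formula (k + 1) else k
  else k
termination_by formula.length - k

def find_innermost_brackets_alt (formula : List String) : Int × Int :=
  if formula.contains "(" = false then (0, (formula.length : Int))
  else
    let opens := ((PySem.List.enumerate formula 0).foldl pvBStep (0, [])).2
    let dmax := (PySem.List.max? (opens.map (·.2)) (fun y => y)).getD 0
    let start := ((opens.find? (fun q => q.2 == dmax)).getD (0, 0)).1 + 1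
    let e := pvScanEnd formula start.toNat
    (start, ((e : Nat) : Int))

-- ===== PRECONDITION & SPEC =====
-- spec-side helpers for Pre_ (independent of both ports): positions and depths of the "(" tokens
def pvDepthStep (d : Int) (s : String) : Int :=
  if s = "(" then d + 1 else if s = ")" then max (d - 1) 0 else d

def pvOpensAux : List String → Int → Int → List (Int × Int)
  | [], _, _ => []
  | s :: ys, i, d =>
    (if s = "(" then [(i, d + 1)] else []) ++ pvOpensAux ys (i + 1) (pvDepthStep d s)

-- Pre_ excludes exactly the inputs on which the Python A raises IndexError: formulas containing "(" whose
-- first deepest "(" is immediately followed by ")" or by the end of the list (B returns the empty region there).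
def Pre_find_innermost_brackets (formula : List String) : Prop :=
  formula.contains "(" = false ∨
    (let o := pvOpensAux formula 0 0
     let m := (o.map (·.2)).foldl max 0
     let j := ((o.find? (fun q => q.2 == m)).getD (0, 0)).1
     (j + 1).toNat < formula.length ∧ formula.getD (j + 1).toNat "" ≠ ")")

instance (formula : List String) : Decidable (Pre_find_innermost_brackets formula) := by
  unfold Pre_find_innermost_brackets; infer_instance

def pvWitness_find_innermost_brackets : List String := ["(", "x", ")"]

def Spec_find_innermost_brackets (formula : List String) (out : Int × Int) : Prop := out = find_innermost_brackets_alt formula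
instance (formula : List String) (out : Int × Int) : Decidable (Spec_find_innermost_brackets formula out) := by unfold Spec_find_innermost_brackets; infer_instance

-- ===== CLAIM (what is proved, stated in full; the proofs are below) =====
def Claim_equal_find_innermost_brackets : Prop := ∀ (formula : List String), Dom_find_innermost_brackets formula → Pre_find_innermost_brackets formula → Spec_find_innermost_brackets formula (find_innermost_brackets formula)

-- ===== LEMMAS AND PROOFS =====
def pvD (ys : List String) : Int := ys.foldl pvDepthStep 0

def pvO (ys : List String) : List (Int × Int) := pvOpensAux ys 0 0

def pvM (ys : List String) : Int := ((pvO ys).map (·.2)).foldl max 0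

def pvStA (ys : List String) (r0 : List Int) : Int × Int × List Int × Bool :=
  (PySem.List.enumerate ys 0).foldl pvAStep (0, 0, r0, false)

theorem pv_opensAux_append (ys : List String) (y : String) (i d : Int) :
    pvOpensAux (ys ++ [y]) i d =
      pvOpensAux ys i d ++
        (if y = "(" then [(i + ys.length, ys.foldl pvDepthStep d + 1)] else []) := by
  induction ys generalizing i d with
  | nil => simp [pvOpensAux]
  | cons s ys ih =>
      simp only [List.cons_append, pvOpensAux, ih, List.append_assoc, List.foldl_cons, List.length_cons]
      have h : i + 1 + (ys.length : Int) = i + ((ys.length : Int) + 1) := by ring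
      rw [h]; push_cast; ring_nf

theorem pv_scan_ge (ys : List String) (k : Nat) : k ≤ pvScanEnd ys k := by
  by_cases h : k < ys.length
  · rw [pvScanEnd]; simp only [h, dif_pos]
    split
    · have := pv_scan_ge ys (k + 1); omega
    · omega
  · rw [pvScanEnd]; simp [h]
termination_by ys.length - k

theorem pv_scan_le (ys : List String) (k : Nat) (hk : k ≤ ys.length) : pvScanEnd ys k ≤ ys.length := by
  by_cases h : k < ys.length
  · rw [pvScanEnd]; simp only [h, dif_pos]
    split
    · exact pv_scan_le ys (k + 1) h
    · omega
  · rw [pvScanEnd]; simp [h]; omega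
termination_by ys.length - k

theorem pv_scan_append (ys : List String) (y : String) (k : Nat) (hk : k ≤ ys.length) :
    pvScanEnd (ys ++ [y]) k =
      if pvScanEnd ys k < ys.length then pvScanEnd ys k
      else if y = ")" then ys.length else ys.length + 1 := by
  by_cases h : k < ys.length
  · have hget : (ys ++ [y])[k]'(by simp; omega) = ys[k] := by
      rw [List.getElem_append_left h]
    rw [pvScanEnd]
    conv_rhs => rw [pvScanEnd]
    simp only [List.length_append, List.length_singleton]
    rw [dif_pos (by omega : k < ys.length + 1), dif_pos h, hget]
    split
    · exact pv_scan_append ys y (k + 1) h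
    · simp
  · have hk' : k = ys.length := by omega
    subst hk'
    rw [pvScanEnd]
    have hbase : pvScanEnd ys ys.length = ys.length := by rw [pvScanEnd]; simp
    rw [hbase]
    simp only [List.length_append, List.length_singleton]
    rw [dif_pos (by omega : ys.length < ys.length + 1)]
    have hget : (ys ++ [y])[ys.length]'(by simp) = y := by simp
    rw [hget]
    by_cases hy : y = ")"
    · simp [hy]
    · have h1 : pvScanEnd (ys ++ [y]) (ys.length + 1) = ys.length + 1 := by
        rw [pvScanEnd]; simp
      simp [hy, h1]
termination_by ys.length - k

theorem pv_stA_append (ys : List String) (y : String) (r0 : List Int) :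
    pvStA (ys ++ [y]) r0 = pvAStep (pvStA ys r0) ((ys.length : Int), y) := by
  unfold pvStA
  rw [PySem.List.enumerate_append]
  simp [PySem.List.enumerate_cons, PySem.List.enumerate_nil, List.foldl_append]

theorem pv_D_append (ys : List String) (y : String) :
    pvD (ys ++ [y]) = pvDepthStep (pvD ys) y := by
  simp [pvD, List.foldl_append]

theorem pv_O_append (ys : List String) (y : String) :
    pvO (ys ++ [y]) = pvO ys ++ (if y = "(" then [((ys.length : Int), pvD ys + 1)] else []) := by
  simp [pvO, pv_opensAux_append, pvD]

theorem pv_M_append (ys : List String) (y : String) :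
    pvM (ys ++ [y]) = if y = "(" then max (pvM ys) (pvD ys + 1) else pvM ys := by
  by_cases hy : y = "("
  · simp [pvM, pv_O_append, hy, List.foldl_append]
  · simp [pvM, pv_O_append, hy]

theorem pv_inv (ys : List String) :
    0 ≤ pvD ys ∧
    (∀ p ∈ pvO ys, 1 ≤ p.2 ∧ p.2 ≤ pvM ys) ∧
    (pvO ys = [] → pvD ys = 0 ∧ ∀ r0, pvStA ys r0 = (0, 0, r0, false)) ∧
    (pvO ys ≠ [] → ∃ j : Int, 0 ≤ j ∧ j < (ys.length : Int) ∧
      (pvO ys).find? (fun q => q.2 == pvM ys) = some (j, pvM ys) ∧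
      (pvScanEnd ys (j.toNat + 1) = ys.length → pvD ys = pvM ys) ∧
      ∀ r0, pvStA ys r0 = (pvD ys, pvM ys,
        PySem.List.pyRange (j + 1) ((pvScanEnd ys (j.toNat + 1) : Nat) : Int) 1,
        decide (pvScanEnd ys (j.toNat + 1) = ys.length))) := by
  induction ys using List.reverseRecOn with
  | nil =>
      refine ⟨by simp [pvD], by simp [pvO, pvOpensAux], fun _ => ⟨rfl, fun r0 => by
        simp [pvStA, PySem.List.enumerate_nil]⟩, fun h => absurd rfl h⟩
  | append_singleton ys y ih =>
      obtain ⟨hD, hbound, hnil, hcons⟩ := ih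
      by_cases hy1 : y = "("
      · -- "(" cases
        subst hy1
        by_cases ho : pvO ys = []
        · -- first "(" ever
          have hd0 := (hnil ho).1
          have hst0 := (hnil ho).2
          have hO' : pvO (ys ++ ["("]) = [((ys.length : Int), 1)] := by
            simp [pv_O_append, ho, hd0]
          have hM' : pvM (ys ++ ["("]) = 1 := by simp [pvM, hO']
          have hD' : pvD (ys ++ ["("]) = 1 := by
            simp [pv_D_append, pvDepthStep, hd0]
          have hscan : pvScanEnd (ys ++ ["("]) (ys.length + 1) = ys.length + 1 := by
            rw [pvScanEnd]; simp
          refine ⟨by omega, by simp [hO', hM'], fun h => by simp [hO'] at h, fun _ => ?_⟩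
          refine ⟨(ys.length : Int), by positivity, by simp, ?_, ?_, ?_⟩
          · simp [hO', hM']
          · intro _; omega
          · intro r0
            rw [pv_stA_append, hst0]
            simp only [pvAStep, Int.toNat_natCast, hscan, hD', hM']
            norm_num [PySem.List.pyRange_one_eq_nil]
        · obtain ⟨j, hj0, hjlt, hfind, hc, hst⟩ := hcons ho
          by_cases hreset : pvD ys + 1 > pvM ys
          · -- new maximal depth: reset
            have hD' : pvD (ys ++ ["("]) = pvD ys + 1 := by
              simp [pv_D_append, pvDepthStep]
            have hO' : pvO (ys ++ ["("]) = pvO ys ++ [((ys.length : Int), pvD ys + 1)] := by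
              simp [pv_O_append]
            have hM' : pvM (ys ++ ["("]) = pvD ys + 1 := by
              rw [pv_M_append]; simp; omega
            have hscan : pvScanEnd (ys ++ ["("]) (ys.length + 1) = ys.length + 1 := by
              rw [pvScanEnd]; simp
            have hfindnone : (pvO ys).find? (fun q => q.2 == pvD ys + 1) = none := by
              rw [List.find?_eq_none]
              intro p hp
              have := hbound p hp
              simp only [beq_iff_eq]
              omega
            refine ⟨by omega, ?_, fun h => by simp [hO'] at h, fun _ => ?_⟩
            · intro p hp
              rw [hO'] at hp; rw [hM']
              rcases List.mem_append.1 hp with h | h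
              · have := hbound p h; constructor <;> omega
              · simp at h; subst h; constructor <;> omega
            refine ⟨(ys.length : Int), by positivity, by simp, ?_, ?_, ?_⟩
            · rw [hO', hM', List.find?_append, hfindnone]
              simp
            · intro _; omega
            · intro r0
              rw [pv_stA_append, hst r0]
              simp only [pvAStep, Int.toNat_natCast, hscan, hD', hM']
              norm_num [PySem.List.pyRange_one_eq_nil, hreset]
          · -- "(" but not deeper than the record
            have hle : pvD ys + 1 ≤ pvM ys := by omega
            have hk1 : j.toNat + 1 ≤ ys.length := by omega
            have helen : pvScanEnd ys (j.toNat + 1) ≤ ys.length := pv_scan_le ys _ hk1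
            have helt : pvScanEnd ys (j.toNat + 1) < ys.length := by
              rcases lt_or_eq_of_le helen with h | h
              · exact h
              · have := hc h; omega
            have hD' : pvD (ys ++ ["("]) = pvD ys + 1 := by
              simp [pv_D_append, pvDepthStep]
            have hM' : pvM (ys ++ ["("]) = pvM ys := by
              rw [pv_M_append]; simp; omega
            have hO' : pvO (ys ++ ["("]) = pvO ys ++ [((ys.length : Int), pvD ys + 1)] := by
              simp [pv_O_append]
            have hscan : pvScanEnd (ys ++ ["("]) (j.toNat + 1) = pvScanEnd ys (j.toNat + 1) := by
              rw [pv_scan_append ys _ _ hk1, if_pos helt]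
            refine ⟨by omega, ?_, fun h => by simp [hO'] at h, fun _ => ?_⟩
            · intro p hp
              rw [hO'] at hp; rw [hM']
              rcases List.mem_append.1 hp with h | h
              · exact hbound p h
              · simp at h; subst h; constructor <;> omega
            refine ⟨j, hj0, by simp; omega, ?_, ?_, ?_⟩
            · rw [hO', hM', List.find?_append, hfind]
              simp
            · intro h; rw [hscan] at h; simp at h; omega
            · intro r0
              rw [pv_stA_append, hst r0]
              simp only [pvAStep, hscan, hD', hM']
              have hb1 : decide (pvScanEnd ys (j.toNat + 1) = ys.length) = false := by
                simp; omega
              have hb2 : decide (pvScanEnd ys (j.toNat + 1) = (ys ++ ["("]).length) = false := by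
                simp; omega
              rw [hb1, hb2]
              norm_num; omega
      · by_cases hy2 : y = ")"
        · -- ")" token
          subst hy2
          have hD' : pvD (ys ++ [")"]) = max (pvD ys - 1) 0 := by
            simp [pv_D_append, pvDepthStep]
          have hO' : pvO (ys ++ [")"]) = pvO ys := by simp [pv_O_append]
          have hM' : pvM (ys ++ [")"]) = pvM ys := by rw [pv_M_append]; simp
          by_cases ho : pvO ys = []
          · have hd0 := (hnil ho).1
            have hst0 := (hnil ho).2
            refine ⟨by omega, by rw [hO', hM']; exact hbound, fun _ => ⟨by omega, fun r0 => ?_⟩,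
              fun h => absurd (hO' ▸ h) (by simp [ho])⟩
            rw [pv_stA_append, hst0]
            simp only [pvAStep]
            norm_num [hd0]
            decide
          · obtain ⟨j, hj0, hjlt, hfind, hc, hst⟩ := hcons ho
            have hk1 : j.toNat + 1 ≤ ys.length := by omega
            have helen : pvScanEnd ys (j.toNat + 1) ≤ ys.length := pv_scan_le ys _ hk1
            have hscan : pvScanEnd (ys ++ [")"]) (j.toNat + 1) = pvScanEnd ys (j.toNat + 1) := by
              rw [pv_scan_append ys _ _ hk1]
              rcases lt_or_eq_of_le helen with h | h
              · rw [if_pos h]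
              · rw [if_neg (by omega)]; simp [h]
            refine ⟨by omega, by rw [hO', hM']; exact hbound, fun h => absurd (hO' ▸ h) ho, fun _ => ?_⟩
            refine ⟨j, hj0, by simp; omega, by rw [hO', hM']; exact hfind, ?_, ?_⟩
            · intro h; rw [hscan] at h; simp at h; omega
            · intro r0
              rw [pv_stA_append, hst r0]
              simp only [pvAStep, hscan, hD', hM']
              have hb2 : decide (pvScanEnd ys (j.toNat + 1) = (ys ++ [")"]).length) = false := by
                simp; omega
              rw [hb2]
              norm_num
              exact fun h => absurd h (by decide)
        · -- ordinary token
          have hD' : pvD (ys ++ [y]) = pvD ys := by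
            simp [pv_D_append, pvDepthStep, hy1, hy2]
          have hO' : pvO (ys ++ [y]) = pvO ys := by simp [pv_O_append, hy1]
          have hM' : pvM (ys ++ [y]) = pvM ys := by rw [pv_M_append]; simp [hy1]
          by_cases ho : pvO ys = []
          · have hd0 := (hnil ho).1
            have hst0 := (hnil ho).2
            refine ⟨by omega, by rw [hO', hM']; exact hbound, fun _ => ⟨by omega, fun r0 => ?_⟩,
              fun h => absurd (hO' ▸ h) (by simp [ho])⟩
            rw [pv_stA_append, hst0]
            simp [pvAStep, hy1, hy2]
          · obtain ⟨j, hj0, hjlt, hfind, hc, hst⟩ := hcons ho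
            have hk1 : j.toNat + 1 ≤ ys.length := by omega
            have helen : pvScanEnd ys (j.toNat + 1) ≤ ys.length := pv_scan_le ys _ hk1
            by_cases he : pvScanEnd ys (j.toNat + 1) = ys.length
            · -- inside the innermost region: the token is collected
              have hscan : pvScanEnd (ys ++ [y]) (j.toNat + 1) = ys.length + 1 := by
                rw [pv_scan_append ys _ _ hk1, if_neg (by omega), if_neg hy2]
              refine ⟨by omega, by rw [hO', hM']; exact hbound, fun h => absurd (hO' ▸ h) ho, fun _ => ?_⟩
              refine ⟨j, hj0, by simp; omega, by rw [hO', hM']; exact hfind, ?_, ?_⟩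
              · intro _; rw [hD', hM']; exact hc he
              · intro r0
                rw [pv_stA_append, hst r0]
                have hcast : ((ys.length + 1 : Nat) : Int) = (ys.length : Int) + 1 := by push_cast; ring
                simp [pvAStep, hy1, hy2, hscan, hD', hM', he, hcast,
                      PySem.List.pyRange_one_succ_right (show j + 1 ≤ (ys.length : Int) by omega)]
            · -- outside: state unchanged
              have helt : pvScanEnd ys (j.toNat + 1) < ys.length := by omega
              have hscan : pvScanEnd (ys ++ [y]) (j.toNat + 1) = pvScanEnd ys (j.toNat + 1) := by
                rw [pv_scan_append ys _ _ hk1, if_pos helt]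
              refine ⟨by omega, by rw [hO', hM']; exact hbound, fun h => absurd (hO' ▸ h) ho, fun _ => ?_⟩
              refine ⟨j, hj0, by simp; omega, by rw [hO', hM']; exact hfind, ?_, ?_⟩
              · intro h; rw [hscan] at h; simp at h; omega
              · intro r0
                rw [pv_stA_append, hst r0]
                simp only [pvAStep, hscan, hD', hM']
                have hb1 : decide (pvScanEnd ys (j.toNat + 1) = ys.length) = false := by simp [he]
                have hb2 : decide (pvScanEnd ys (j.toNat + 1) = (ys ++ [y]).length) = false := by
                  simp; omega
                rw [hb1, hb2]
                simp [hy1, hy2]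

theorem pv_opens_nil_iff (ys : List String) (i d : Int) :
    pvOpensAux ys i d = [] ↔ ys.contains "(" = false := by
  induction ys generalizing i d with
  | nil => simp [pvOpensAux]
  | cons s ys ih =>
      by_cases hs : s = "("
      · simp [pvOpensAux, hs]
      · simp [pvOpensAux, hs, ih, Ne.symm hs]

theorem pv_bfold (ys : List String) (s d : Int) (acc : List (Int × Int)) :
    ((PySem.List.enumerate ys s).foldl pvBStep (d, acc)) =
      (ys.foldl pvDepthStep d, acc ++ pvOpensAux ys s d) := by
  induction ys generalizing s d acc with
  | nil => simp [PySem.List.enumerate_nil, pvOpensAux]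
  | cons x ys ih =>
      rw [PySem.List.enumerate_cons]
      by_cases h1 : x = "("
      · simp [pvBStep, h1, pvOpensAux, pvDepthStep, ih]
      · by_cases h2 : x = ")"
        · simp [pvBStep, h2, pvOpensAux, pvDepthStep, ih]
        · simp [pvBStep, h1, h2, pvOpensAux, pvDepthStep, ih]

theorem pv_range_head (a b : Int) (h : a < b) :
    (PySem.List.pyRange a b 1).headD 0 = a := by
  rw [PySem.List.pyRange_one_cons h]; rfl

theorem pv_range_last (a b : Int) (h : a < b) :
    (PySem.List.pyRange a b 1).getLastD 0 = b - 1 := by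
  have hb : b = (b - 1) + 1 := by ring
  rw [hb, PySem.List.pyRange_one_succ_right (by omega)]
  simp

theorem pv_main (formula : List String)
    (hpre : Pre_find_innermost_brackets formula) :
    find_innermost_brackets formula = find_innermost_brackets_alt formula := by
  by_cases hcont : formula.contains "(" = false
  · have ho : pvO formula = [] := (pv_opens_nil_iff formula 0 0).2 hcont
    obtain ⟨hd0, hst0⟩ := (pv_inv formula).2.2.1 ho
    have hst := hst0 [0, (formula.length : Int) - 1]
    unfold find_innermost_brackets find_innermost_brackets_alt
    rw [if_pos hcont]
    rw [pvStA] at hst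
    rw [hst]
    simp
  · obtain ⟨j, hj0, hjlt, hfind, hcnd, hst⟩ :=
      (pv_inv formula).2.2.2 (fun h => hcont ((pv_opens_nil_iff formula 0 0).1 h))
    have hst := hst [0, (formula.length : Int) - 1]
    rw [pvStA] at hst
    have hopens : ((PySem.List.enumerate formula 0).foldl pvBStep ((0 : Int), ([] : List (Int × Int)))).2
        = pvO formula := by
      rw [pv_bfold]; rfl
    have ho' : pvO formula ≠ [] := fun h => hcont ((pv_opens_nil_iff formula 0 0).1 h)
    obtain ⟨x, t, hxt⟩ := List.exists_cons_of_ne_nil ho'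
    have hx1 : 1 ≤ x.2 := ((pv_inv formula).2.1 x (by rw [hxt]; exact List.mem_cons_self)).1
    have hmax : (PySem.List.max? ((pvO formula).map (·.2)) (fun y => y)).getD 0 = pvM formula := by
      rw [hxt]
      simp only [List.map_cons, PySem.List.max?_id_cons, Option.getD_some]
      unfold pvM
      rw [hxt]
      simp only [List.map_cons, List.foldl_cons]
      congr 1
      omega
    have hjnat : ((j + 1).toNat) = j.toNat + 1 := by omega
    -- the Pre_ side condition, rewritten through hfind: the scan moves at least one step
    rcases hpre with h | hpre
    · exact absurd h hcont
    have hjpre : (((pvO formula).find? (fun q => q.2 == pvM formula)).getD (0, 0)).1 = j := by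
      rw [hfind]; rfl
    simp only [pvO, pvM] at hjpre
    obtain ⟨hlt, hne⟩ := hpre
    rw [hjpre, hjnat] at hlt hne
    have hget : formula.getD (j.toNat + 1) "" = formula[j.toNat + 1]'hlt := by
      exact List.getD_eq_getElem formula "" hlt
    have hscan1 : pvScanEnd formula (j.toNat + 1) = pvScanEnd formula (j.toNat + 2) := by
      rw [pvScanEnd]
      rw [dif_pos hlt, if_pos (by rw [← hget]; exact hne)]
    have hscge : j.toNat + 2 ≤ pvScanEnd formula (j.toNat + 1) := by
      rw [hscan1]; exact pv_scan_ge formula (j.toNat + 2)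
    have hlt' : j + 1 < ((pvScanEnd formula (j.toNat + 1) : Nat) : Int) := by omega
    unfold find_innermost_brackets find_innermost_brackets_alt
    rw [if_neg hcont]
    simp only [hopens, hmax, hfind, Option.getD_some, hst, hjnat]
    rw [pv_range_head _ _ hlt', pv_range_last _ _ hlt']
    ring_nf

-- ===== VERDICT (by name: the statement is the Claim_ definition above) =====
theorem find_innermost_brackets_spec : Claim_equal_find_innermost_brackets := by
  intro formula _ hpre
  unfold Spec_find_innermost_brackets
  exact pv_main formula hpre
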